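-- pv_equiv track=rewrite | github.com/ryanriccio1/crypto | encryption_algorithms/vigenere.py | _sequence_lists
-- ===== SOURCE A (Python) =====
-- def _sequence_lists(text, count):
--     """ Finds the index of all count-length sequences in the ciphertext and
--         returns them in a dictionary. Used for cryptanalysis. All sequences are
--         returned, but only repeated sequences have value.
--         For a text of "ABCDABCD" and sequence length of 3, the function returns
--           { "ABC":[0,4], "BCD":[1,5], "CDA":[2], "DAB":[3] }
--     """
--     sequences = {}
--     lastIndex = len(text)-count
--     for i in range(lastIndex+1):
--         s = text[i:i+count]
--         sequences[s] = sequences.get(s, [])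
--         sequences[s].append(i)
--     return sequences
-- ===== SOURCE B (Python) =====
-- def _sequence_lists(text, count):
--     """Dedup-then-gather re-implementation: list every count-length substring
--     once, then collect each substring's indices with a single comprehension."""
--     subs = [text[i:i+count] for i in range(len(text)-count+1)]
--     return {s: [i for i, t in enumerate(subs) if t == s] for s in dict.fromkeys(subs)}
-- ===== Notes on version B (the rewrite author's own statement) =====
-- stated objective: simpler
-- what changed: Replaces A's incremental dict-of-lists accumulation (get-or-default then append per step) with a dedup-then-gather decomposition: materialise the substring list once, take its first-occurrence dedup as the key order, and build each value list by one comprehension over the enumerated substrings.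
import Mathlib
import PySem

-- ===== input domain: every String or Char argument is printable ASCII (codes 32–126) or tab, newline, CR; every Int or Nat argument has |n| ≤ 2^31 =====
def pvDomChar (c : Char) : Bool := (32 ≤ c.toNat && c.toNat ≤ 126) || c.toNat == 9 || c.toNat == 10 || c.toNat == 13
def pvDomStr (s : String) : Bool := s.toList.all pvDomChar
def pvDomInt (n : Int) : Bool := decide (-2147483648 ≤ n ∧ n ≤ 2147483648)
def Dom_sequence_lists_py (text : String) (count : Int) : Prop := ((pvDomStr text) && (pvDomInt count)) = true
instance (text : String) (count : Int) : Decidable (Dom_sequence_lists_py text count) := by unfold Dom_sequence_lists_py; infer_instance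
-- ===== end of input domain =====

-- B replaces A's incremental dict-of-lists accumulation with a dedup-then-gather decomposition (objective: simpler).

-- ===== PORT A =====
-- literal transliteration of Source A: one pass, per index get-or-default then append into the dict
def sequence_lists_py (text : String) (count : Int) : List (String × List Int) :=
  let lastIndex : Int := PySem.Str.len text - count
  (((PySem.List.pyRange 0 (lastIndex + 1) 1).foldl
      (fun (d : PySem.Dict String (List Int)) (i : Int) =>
        let s := PySem.Str.slice text (some i) (some (i + count))
        d.insert s (d.getD s [] ++ [i]))
      PySem.Dict.empty)).items

-- ===== PORT B =====
-- literal transliteration of Source B: substring list, first-occurrence dedup (dict.fromkeys),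
-- then one gathering comprehension per key; the dict comprehension's keys are distinct, so
-- the resulting dict is exactly this association list in that order
def sequence_lists_py_alt (text : String) (count : Int) : List (String × List Int) :=
  let subs := (PySem.List.pyRange 0 (PySem.Str.len text - count + 1) 1).map
      (fun i => PySem.Str.slice text (some i) (some (i + count)))
  (PySem.List.dedup subs).map
    (fun s => (s, ((PySem.List.enumerate subs 0).filter (fun p => p.2 == s)).map (·.1)))

-- ===== PRECONDITION & SPEC =====
def Spec_sequence_lists_py (text : String) (count : Int) (out : List (String × List Int)) : Prop := out = sequence_lists_py_alt text count
instance (text : String) (count : Int) (out : List (String × List Int)) : Decidable (Spec_sequence_lists_py text count out) := by unfold Spec_sequence_lists_py; infer_instance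

-- ===== CLAIM (what is proved, stated in full; the proofs are below) =====
def Claim_equal_sequence_lists_py : Prop := ∀ (text : String) (count : Int), Dom_sequence_lists_py text count → Spec_sequence_lists_py text count (sequence_lists_py text count)

-- ===== LEMMAS AND PROOFS =====

-- proof-only abbreviation for the window substring at index i
def pvWin (text : String) (count : Int) (i : Int) : String :=
  PySem.Str.slice text (some i) (some (i + count))

-- enumerating a comprehension over range(a, b) pairs each index with its value
theorem enum_map_pyRange {α : Type} (f : Int → α) (a b : Int) :
    PySem.List.enumerate ((PySem.List.pyRange a b 1).map f) a
      = (PySem.List.pyRange a b 1).map (fun i => (i, f i)) := by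
  obtain ⟨n, hn⟩ : ∃ n : Nat, (b - a).toNat = n := ⟨_, rfl⟩
  induction n generalizing a with
  | zero =>
    rw [PySem.List.pyRange_one_eq_nil (by omega)]
    simp
  | succ n ih =>
    rw [PySem.List.pyRange_one_cons (by omega)]
    simp only [List.map_cons, PySem.List.enumerate_cons]
    rw [ih (a + 1) (by omega)]

theorem sequence_lists_core (text : String) (count : Int) :
    sequence_lists_py text count = sequence_lists_py_alt text count := by
  show (((PySem.List.pyRange 0 (PySem.Str.len text - count + 1) 1).foldl
      (fun (d : PySem.Dict String (List Int)) (i : Int) =>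
        let s := PySem.Str.slice text (some i) (some (i + count))
        d.insert s (d.getD s [] ++ [i]))
      PySem.Dict.empty)).items
    = ((PySem.List.pyRange 0 (PySem.Str.len text - count + 1) 1).map
        (fun i => PySem.Str.slice text (some i) (some (i + count)))
      |> fun subs => (PySem.List.dedup subs).map
        (fun s => (s, ((PySem.List.enumerate subs 0).filter (fun p => p.2 == s)).map (·.1))))
  set R := PySem.List.pyRange 0 (PySem.Str.len text - count + 1) 1 with hR
  set f := pvWin text count with hf
  -- A's insert-with-default-append step IS dict.modify with default [], over the (key, index) pairs
  have hA : ((R.foldl (fun (d : PySem.Dict String (List Int)) (i : Int) =>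
        let s := PySem.Str.slice text (some i) (some (i + count))
        d.insert s (d.getD s [] ++ [i])) PySem.Dict.empty)) =
      ((R.map (fun i => (f i, i))).foldl (fun d p => d.modify p.1 [] (· ++ [p.2])) PySem.Dict.empty) := by
    rw [List.foldl_map]
    rfl
  rw [hA]
  set D := ((R.map (fun i => (f i, i))).foldl (fun (d : PySem.Dict String (List Int)) p => d.modify p.1 [] (· ++ [p.2])) PySem.Dict.empty) with hD
  have hnd : D.keys.Nodup := by
    apply PySem.Dict.nodup_keys_foldl_modify_key
    simp [PySem.Dict.keys_empty]
  rw [PySem.Dict.items_eq_map_keys D hnd []]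
  have hkeys : D.keys = PySem.Set.ofList (R.map f) := by
    rw [hD, PySem.Dict.keys_foldl_modify_key]
    simp [List.map_map, PySem.Dict.keys_empty]
    rfl
  simp only [PySem.List.dedup_eq_ofList]
  rw [hkeys]
  apply List.map_congr_left
  intro k _
  have hg : D.getD k [] = ((R.map (fun i => (f i, i))).filter (fun p => p.1 == k)).map (·.2) := by
    rw [hD, PySem.Dict.getD_foldl_modify_append]
    simp [PySem.Dict.getD_empty]
  rw [hg]
  have he : PySem.List.enumerate (R.map (fun i => PySem.Str.slice text (some i) (some (i + count)))) 0
      = R.map (fun i => (i, PySem.Str.slice text (some i) (some (i + count)))) := by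
    rw [hR]; exact enum_map_pyRange _ 0 _
  rw [he]
  simp only [hf, pvWin]
  simp [List.filter_map, List.map_map, Function.comp_def]

-- ===== VERDICT (by name: the statement is the Claim_ definition above) =====
theorem sequence_lists_py_spec : Claim_equal_sequence_lists_py := by
  intro text count _
  exact sequence_lists_core text count
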